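-- pv_equiv track=rewrite | github.com/eko-071/code-obfuscator | obfuscate.py | flatten_code
-- ===== SOURCE A (Python) =====
-- def flatten_code(code, level):
--     """Collapse code to minimum lines (extreme only)."""
--     if level != "extreme":
--         return code
--
--     lines = code.split("\n")
--     result = []
--     buffer = ""
--
--     for line in lines:
--         stripped = line.strip()
--         if not stripped:
--             continue
--         if stripped.startswith("#"):
--             if buffer:
--                 result.append(buffer.strip())
--                 buffer = ""
--             result.append(stripped)
--         else:
--             buffer += " " + stripped
--
--     if buffer:
--         result.append(buffer.strip())
--
--     return "\n".join(result)
-- ===== SOURCE B (Python) =====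
-- def flatten_code(code, level):
--     """Collapse code to minimum lines (extreme only)."""
--     if level != "extreme":
--         return code
--
--     # filter first: stripped, non-blank lines; then group consecutive runs
--     lines = [s for s in (l.strip() for l in code.split("\n")) if s]
--
--     result = []
--     i = 0
--     n = len(lines)
--     while i < n:
--         if lines[i].startswith("#"):
--             result.append(lines[i])
--             i += 1
--         else:
--             j = i + 1
--             while j < n and not lines[j].startswith("#"):
--                 j += 1
--             result.append(" ".join(lines[i:j]))
--             i = j
--     return "\n".join(result)
-- ===== Notes on version B (the rewrite author's own statement) =====
-- stated objective: alternative
-- what changed: Replaced A's single-pass buffer state machine with a filter-then-group decomposition: strip and drop blank lines first, then walk consecutive runs, emitting comment lines individually and joining each non-comment run with ' '.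
import Mathlib
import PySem

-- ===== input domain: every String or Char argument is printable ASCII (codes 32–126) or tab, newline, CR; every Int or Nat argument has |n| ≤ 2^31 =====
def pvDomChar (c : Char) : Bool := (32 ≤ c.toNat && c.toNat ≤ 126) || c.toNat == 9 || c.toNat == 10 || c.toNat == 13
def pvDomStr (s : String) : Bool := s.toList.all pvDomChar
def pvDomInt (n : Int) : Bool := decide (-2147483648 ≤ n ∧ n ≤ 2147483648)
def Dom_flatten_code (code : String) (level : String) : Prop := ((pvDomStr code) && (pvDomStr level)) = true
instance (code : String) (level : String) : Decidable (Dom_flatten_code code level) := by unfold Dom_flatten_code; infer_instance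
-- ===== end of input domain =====

-- B replaces A's buffer state machine by a filter-then-group decomposition (alternative structure, same cost).

-- ===== PORT A =====
-- A's loop body: strip the line, skip blanks, flush the buffer at a comment, else extend the buffer.
-- (code.split("\n"): PySem.Str.split? is none only for an empty separator, never here, so .getD [] is exact.)
def stepA (acc : List String × String) (line : String) : List String × String :=
  let stripped := PySem.Str.strip line
  if stripped = "" then acc
  else if PySem.Str.startswith stripped "#" then
    if acc.2 ≠ "" then (acc.1 ++ [PySem.Str.strip acc.2, stripped], "")
    else (acc.1 ++ [stripped], "")
  else (acc.1, acc.2 ++ " " ++ stripped)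

def flatten_code (code : String) (level : String) : String :=
  if level ≠ "extreme" then code
  else
    let lines := (PySem.Str.split? code "\n").getD []
    let acc := lines.foldl stepA ([], "")
    let result := if acc.2 ≠ "" then acc.1 ++ [PySem.Str.strip acc.2] else acc.1
    PySem.Str.join "\n" result

-- ===== PORT B =====
def notComment (s : String) : Bool := !(PySem.Str.startswith s "#")

-- B's outer while loop as structural recursion; the inner run-collecting while loop
-- (and the lines[i:j] slice it delimits) is takeWhile/dropWhile.
def goB : List String → List String
  | [] => []
  | x :: rest =>
    if PySem.Str.startswith x "#" then x :: goB rest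
    else PySem.Str.join " " (x :: rest.takeWhile notComment) :: goB (rest.dropWhile notComment)
  termination_by ls => ls.length
  decreasing_by
  · simp
  · exact Nat.lt_succ_of_le (List.length_dropWhile_le _ _)

def flatten_code_alt (code : String) (level : String) : String :=
  if level ≠ "extreme" then code
  else
    let lines := (((PySem.Str.split? code "\n").getD []).map PySem.Str.strip).filter (fun s => s ≠ "")
    PySem.Str.join "\n" (goB lines)

-- ===== PRECONDITION & SPEC =====
def Spec_flatten_code (code : String) (level : String) (out : String) : Prop := out = flatten_code_alt code level
instance (code : String) (level : String) (out : String) : Decidable (Spec_flatten_code code level out) := by unfold Spec_flatten_code; infer_instance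

-- ===== CLAIM (what is proved, stated in full; the proofs are below) =====
def Claim_equal_flatten_code : Prop := ∀ (code : String) (level : String), Dom_flatten_code code level → Spec_flatten_code code level (flatten_code code level)

-- ===== LEMMAS AND PROOFS =====

-- A's loop body on an already-stripped line
def coreA (acc : List String × String) (s : String) : List String × String :=
  if s = "" then acc
  else if PySem.Str.startswith s "#" then
    if acc.2 ≠ "" then (acc.1 ++ [PySem.Str.strip acc.2, s], "")
    else (acc.1 ++ [s], "")
  else (acc.1, acc.2 ++ " " ++ s)

theorem stepA_eq_core (acc : List String × String) (line : String) :
    stepA acc line = coreA acc (PySem.Str.strip line) := rfl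

def Clean (s : String) : Prop := PySem.Str.strip s = s ∧ s ≠ ""

def bufOf : List String → String
  | [] => ""
  | s :: r => " " ++ s ++ bufOf r

def finishA (acc : List String × String) : List String :=
  if acc.2 ≠ "" then acc.1 ++ [PySem.Str.strip acc.2] else acc.1

def emitB (segs : List String) (ls : List String) : List String :=
  if segs = [] then goB ls
  else PySem.Str.join " " (segs ++ ls.takeWhile notComment) :: goB (ls.dropWhile notComment)

-- ---- char-level facts about strip ----

theorem cleanC_lstrip (l : List Char) (h : PySem.Chars.strip l = l) :
    PySem.Chars.lstrip l = l := by
  have hsuf : PySem.Chars.lstrip l <:+ l := by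
    simpa [PySem.Chars.lstrip] using List.dropWhile_suffix (l := l) (p := PySem.Chars.isspace)
  have h2 : l.length ≤ (PySem.Chars.lstrip l).length := by
    have h1 : (PySem.Chars.rstrip (PySem.Chars.lstrip l)).length ≤ (PySem.Chars.lstrip l).length := by
      simpa [PySem.Chars.rstrip] using
        List.length_dropWhile_le (l := (PySem.Chars.lstrip l).reverse) (p := PySem.Chars.isspace)
    have := congrArg List.length h
    simp [PySem.Chars.strip] at this
    omega
  exact hsuf.eq_of_length (le_antisymm hsuf.length_le h2)

theorem cleanC_rstrip (l : List Char) (h : PySem.Chars.strip l = l) :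
    PySem.Chars.rstrip l = l := by
  have := cleanC_lstrip l h
  simpa [PySem.Chars.strip, this] using h

theorem lstrip_append (a b : List Char) (ha : PySem.Chars.lstrip a = a) (hne : a ≠ []) :
    PySem.Chars.lstrip (a ++ b) = a ++ b := by
  have ha' : List.dropWhile PySem.Chars.isspace a = a := ha
  show List.dropWhile PySem.Chars.isspace (a ++ b) = a ++ b
  rw [List.dropWhile_append, ha']
  cases a with
  | nil => exact absurd rfl hne
  | cons c t => simp

theorem rstrip_append (a b : List Char) (hb : PySem.Chars.rstrip b = b) (hne : b ≠ []) :
    PySem.Chars.rstrip (a ++ b) = a ++ b := by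
  have hb' : List.dropWhile PySem.Chars.isspace b.reverse = b.reverse := by
    have := congrArg List.reverse hb
    simpa [PySem.Chars.rstrip] using this
  have hrne : b.reverse ≠ [] := by simpa using hne
  show (List.dropWhile PySem.Chars.isspace (a ++ b).reverse).reverse = a ++ b
  rw [List.reverse_append, List.dropWhile_append, hb']
  have hbe : b.reverse.isEmpty = false := by
    cases hbr : b.reverse with
    | nil => exact absurd hbr hrne
    | cons c t => rfl
  rw [hbe]
  simp

theorem strip_space_cons (l : List Char) :
    PySem.Chars.strip (' ' :: l) = PySem.Chars.strip l := by
  simp [PySem.Chars.strip, PySem.Chars.lstrip, PySem.Chars.isspace]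

theorem join_ne_nil (segs : List (List Char)) (hne : segs ≠ [])
    (hc : ∀ x ∈ segs, x ≠ []) : PySem.Chars.join [' '] segs ≠ [] := by
  match segs with
  | [] => exact absurd rfl hne
  | [a] =>
    have := hc a (by simp)
    simpa [PySem.Chars.join_singleton] using this
  | a :: b :: r => simp [PySem.Chars.join_cons_cons]

theorem strip_join_clean (segs : List (List Char))
    (hc : ∀ x ∈ segs, PySem.Chars.strip x = x ∧ x ≠ []) (hne : segs ≠ []) :
    PySem.Chars.strip (PySem.Chars.join [' '] segs) = PySem.Chars.join [' '] segs := by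
  induction segs with
  | nil => exact absurd rfl hne
  | cons a r ih =>
    match r with
    | [] =>
      simpa [PySem.Chars.join_singleton] using (hc a (by simp)).1
    | b :: r' =>
      have ha := hc a (by simp)
      have hr : ∀ x ∈ b :: r', PySem.Chars.strip x = x ∧ x ≠ [] := by
        intro x hx; exact hc x (by simp [hx])
      have ihr := ih hr (by simp)
      have hjne : PySem.Chars.join [' '] (b :: r') ≠ [] :=
        join_ne_nil _ (by simp) (fun x hx => (hr x hx).2)
      have hl : PySem.Chars.lstrip (a ++ ([' '] ++ PySem.Chars.join [' '] (b :: r'))) =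
          a ++ ([' '] ++ PySem.Chars.join [' '] (b :: r')) :=
        lstrip_append _ _ (cleanC_lstrip a ha.1) ha.2
      have hrj : PySem.Chars.rstrip ((a ++ [' ']) ++ PySem.Chars.join [' '] (b :: r')) =
          (a ++ [' ']) ++ PySem.Chars.join [' '] (b :: r') :=
        rstrip_append _ _ (cleanC_rstrip _ ihr) hjne
      have : PySem.Chars.strip (a ++ [' '] ++ PySem.Chars.join [' '] (b :: r')) =
          a ++ [' '] ++ PySem.Chars.join [' '] (b :: r') := by
        simp only [PySem.Chars.strip]
        rw [show a ++ [' '] ++ PySem.Chars.join [' '] (b :: r') =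
          a ++ ([' '] ++ PySem.Chars.join [' '] (b :: r')) by simp]
        rw [hl]
        rw [show a ++ ([' '] ++ PySem.Chars.join [' '] (b :: r')) =
          (a ++ [' ']) ++ PySem.Chars.join [' '] (b :: r') by simp]
        exact hrj
      simpa [PySem.Chars.join_cons_cons] using this

theorem dropWhile_idem (p : Char → Bool) (l : List Char) :
    List.dropWhile p (List.dropWhile p l) = List.dropWhile p l := by
  induction l with
  | nil => simp
  | cons a l ih =>
    by_cases h : p a
    · simp [List.dropWhile_cons, h, ih]
    · simp [List.dropWhile_cons, h]

theorem rstripC_idem (l : List Char) :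
    PySem.Chars.rstrip (PySem.Chars.rstrip l) = PySem.Chars.rstrip l := by
  simp only [PySem.Chars.rstrip, List.reverse_reverse, dropWhile_idem]

theorem stripC_idem (l : List Char) :
    PySem.Chars.strip (PySem.Chars.strip l) = PySem.Chars.strip l := by
  have hx : List.dropWhile PySem.Chars.isspace (PySem.Chars.lstrip l) = PySem.Chars.lstrip l :=
    dropWhile_idem _ _
  rcases hres : PySem.Chars.rstrip (PySem.Chars.lstrip l) with _ | ⟨c, m⟩
  · simp only [PySem.Chars.strip]
    rw [hres]
    simp [PySem.Chars.lstrip, PySem.Chars.rstrip]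
  · have hpre : PySem.Chars.rstrip (PySem.Chars.lstrip l) <+: PySem.Chars.lstrip l := by
      have h1 : List.dropWhile PySem.Chars.isspace (PySem.Chars.lstrip l).reverse <:+
          (PySem.Chars.lstrip l).reverse := List.dropWhile_suffix _
      have h2 := List.reverse_prefix.mpr h1
      simpa [PySem.Chars.rstrip] using h2
    obtain ⟨t, ht⟩ := hpre
    rw [hres] at ht
    have hpc : PySem.Chars.isspace c = false := by
      by_cases hc : PySem.Chars.isspace c = true
      · exfalso
        have hx' := hx
        rw [← ht] at hx'
        simp [List.dropWhile_cons, hc] at hx'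
        have hlen := congrArg List.length hx'
        have hle := List.length_dropWhile_le (p := PySem.Chars.isspace) (l := m ++ t)
        simp at hlen hle
        omega
      · simpa using hc
    simp only [PySem.Chars.strip]
    rw [hres]
    rw [show PySem.Chars.lstrip (c :: m) = c :: m from by
      simp [PySem.Chars.lstrip, List.dropWhile_cons, hpc]]
    rw [← hres]
    exact rstripC_idem _

-- ---- string-level consequences ----

theorem strip_idem (s : String) :
    PySem.Str.strip (PySem.Str.strip s) = PySem.Str.strip s := by
  apply String.ext
  simp only [PySem.Str.toList_strip]
  exact stripC_idem _

theorem toList_bufOf (segs : List String) (hne : segs ≠ []) :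
    (bufOf segs).toList = ' ' :: PySem.Chars.join [' '] (segs.map String.toList) := by
  induction segs with
  | nil => exact absurd rfl hne
  | cons a r ih =>
    match r with
    | [] => simp [bufOf, PySem.Chars.join_singleton]
    | b :: r' =>
      have h := ih (by simp)
      simp [bufOf, PySem.Chars.join_cons_cons] at h ⊢
      simp [h, PySem.Chars.join_cons_cons]

theorem bufOf_ne_empty (segs : List String) (hne : segs ≠ []) : bufOf segs ≠ "" := by
  intro h
  have := congrArg String.toList h
  rw [toList_bufOf segs hne] at this
  simp at this

theorem bufOf_append (segs : List String) (x : String) :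
    bufOf (segs ++ [x]) = bufOf segs ++ " " ++ x := by
  induction segs with
  | nil => apply String.ext; simp [bufOf]
  | cons a r ih =>
    apply String.ext
    have h := congrArg String.toList ih
    simp at h
    simp [bufOf, h]

theorem strip_bufOf (segs : List String) (hne : segs ≠ []) (hc : ∀ x ∈ segs, Clean x) :
    PySem.Str.strip (bufOf segs) = PySem.Str.join " " segs := by
  apply String.ext
  have hc' : ∀ x ∈ segs.map String.toList, PySem.Chars.strip x = x ∧ x ≠ [] := by
    intro x hx
    simp at hx
    obtain ⟨s, hs, rfl⟩ := hx
    have hcs := hc s hs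
    constructor
    · have := congrArg String.toList hcs.1
      simpa using this
    · intro h
      exact hcs.2 (String.ext (by simpa using h))
  show (PySem.Str.strip (bufOf segs)).toList = (PySem.Str.join " " segs).toList
  rw [PySem.Str.toList_strip, toList_bufOf segs hne, strip_space_cons]
  have h2 : (PySem.Str.join " " segs).toList = PySem.Chars.join [' '] (segs.map String.toList) := by
    simp [PySem.Str.toList_join]
  rw [h2]
  exact strip_join_clean _ hc' (by simpa using hne)

-- ---- the loop correspondence ----

theorem goB_cons_comment (x : String) (ls : List String) (h : PySem.Str.startswith x "#" = true) :
    goB (x :: ls) = x :: goB ls := by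
  rw [goB, if_pos h]

theorem goB_cons_code (x : String) (ls : List String) (h : PySem.Str.startswith x "#" = false) :
    goB (x :: ls) = PySem.Str.join " " (x :: ls.takeWhile notComment) :: goB (ls.dropWhile notComment) := by
  rw [goB, if_neg (by rw [h]; simp)]

theorem mainA (ls : List String) : ∀ (segs res : List String),
    (∀ y ∈ ls, Clean y) → (∀ y ∈ segs, Clean y) →
    finishA (ls.foldl coreA (res, bufOf segs)) = res ++ emitB segs ls := by
  induction ls with
  | nil =>
    intro segs res _ hsegs
    by_cases h : segs = []
    · subst h; simp [finishA, bufOf, emitB, goB]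
    · simp [finishA, emitB, h, bufOf_ne_empty segs h, strip_bufOf segs h hsegs, goB]
  | cons x ls ih =>
    intro segs res hls hsegs
    have hx : Clean x := hls x (by simp)
    have hls' : ∀ y ∈ ls, Clean y := fun y hy => hls y (by simp [hy])
    by_cases hcom : PySem.Str.startswith x "#" = true
    · by_cases h : segs = []
      · subst h
        have hstep : coreA (res, bufOf []) x = (res ++ [x], bufOf []) := by
          simp only [coreA, bufOf]
          rw [if_neg hx.2, if_pos hcom, if_neg (by simp)]
        rw [List.foldl_cons, hstep, ih [] (res ++ [x]) hls' (by simp)]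
        simp [emitB, goB_cons_comment x ls hcom]
      · have hb := bufOf_ne_empty segs h
        have hstep : coreA (res, bufOf segs) x =
            (res ++ [PySem.Str.strip (bufOf segs), x], bufOf []) := by
          simp only [coreA]
          rw [if_neg hx.2, if_pos hcom, if_pos hb]
          simp [bufOf]
        rw [List.foldl_cons, hstep, ih [] _ hls' (by simp)]
        have hnc : notComment x = false := by simp only [notComment, hcom]; rfl
        simp [emitB, h, strip_bufOf segs h hsegs, hnc, goB_cons_comment x ls hcom]
    · have hcom' : PySem.Str.startswith x "#" = false := by simpa using hcom
      have hstep : coreA (res, bufOf segs) x = (res, bufOf (segs ++ [x])) := by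
        simp only [coreA]
        rw [if_neg hx.2, if_neg (by rw [hcom']; simp), bufOf_append]
      have hall : ∀ y ∈ segs ++ [x], Clean y := by
        intro y hy
        rcases List.mem_append.1 hy with h' | h'
        · exact hsegs y h'
        · simp at h'; subst h'; exact hx
      rw [List.foldl_cons, hstep, ih (segs ++ [x]) res hls' hall]
      have hnc : notComment x = true := by simp only [notComment, hcom']; rfl
      by_cases h : segs = []
      · subst h
        simp [emitB, goB_cons_code x ls hcom', hnc]
      · simp [emitB, h, hnc, goB_cons_code x ls hcom', List.takeWhile_cons, List.dropWhile_cons]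

theorem clean_of_filtered (lines : List String) (x : String)
    (hx : x ∈ (lines.map PySem.Str.strip).filter (fun s => s ≠ "")) : Clean x := by
  simp [List.mem_filter] at hx
  obtain ⟨⟨l, _, rfl⟩, hne⟩ := hx
  exact ⟨strip_idem l, hne⟩

theorem foldl_reduce (lines : List String) :
    lines.foldl stepA ([], "") =
      ((lines.map PySem.Str.strip).filter (fun s => s ≠ "")).foldl coreA ([], "") := by
  rw [List.foldl_filter, List.foldl_map]
  congr 1
  funext acc s
  by_cases h : PySem.Str.strip s = ""
  · simp [stepA_eq_core, h, coreA]
  · simp [stepA_eq_core, h]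

-- ===== VERDICT (by name: the statement is the Claim_ definition above) =====
theorem flatten_code_spec : Claim_equal_flatten_code := by
  intro code level _
  unfold Spec_flatten_code
  by_cases hl : level = "extreme"
  · subst hl
    unfold flatten_code flatten_code_alt
    rw [if_neg (by simp), if_neg (by simp)]
    dsimp only
    rw [foldl_reduce]
    have h := mainA ((((PySem.Str.split? code "\n").getD []).map PySem.Str.strip).filter (fun s => s ≠ ""))
        [] [] (fun x hx => clean_of_filtered _ x hx) (by simp)
    have h2 : emitB [] ((((PySem.Str.split? code "\n").getD []).map PySem.Str.strip).filter (fun s => s ≠ "")) =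
        goB ((((PySem.Str.split? code "\n").getD []).map PySem.Str.strip).filter (fun s => s ≠ "")) := by
      simp [emitB]
    rw [show bufOf [] = "" from rfl, h2, List.nil_append] at h
    rw [← h]
    rfl
  · simp [flatten_code, flatten_code_alt, hl]
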